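-- pv_equiv track=rewrite | github.com/sumeir/CSC110 | Assignment 6/assignment6.py | growing_strings
-- ===== SOURCE A (Python) =====
-- def growing_strings(los):
-- 	if len(los) == 0 or len(los) == 1:
-- 		return True
-- 	else:
-- 		for i in range(len(los)-1):
-- 			if len(los[i+1]) <= len(los[i]):
-- 				return False
-- 		return True
-- ===== SOURCE B (Python) =====
-- def growing_strings(los):
--     lens = [len(s) for s in los]
--     return lens == sorted(lens) and len(set(lens)) == len(lens)
-- ===== Notes on version B (the rewrite author's own statement) =====
-- stated objective: idiomatic
-- what changed: Replaces the indexed adjacent-pair scan with a sort-and-compare: the length list equals its sorted version (non-decreasing) and has no duplicates (strictness).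
import Mathlib
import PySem

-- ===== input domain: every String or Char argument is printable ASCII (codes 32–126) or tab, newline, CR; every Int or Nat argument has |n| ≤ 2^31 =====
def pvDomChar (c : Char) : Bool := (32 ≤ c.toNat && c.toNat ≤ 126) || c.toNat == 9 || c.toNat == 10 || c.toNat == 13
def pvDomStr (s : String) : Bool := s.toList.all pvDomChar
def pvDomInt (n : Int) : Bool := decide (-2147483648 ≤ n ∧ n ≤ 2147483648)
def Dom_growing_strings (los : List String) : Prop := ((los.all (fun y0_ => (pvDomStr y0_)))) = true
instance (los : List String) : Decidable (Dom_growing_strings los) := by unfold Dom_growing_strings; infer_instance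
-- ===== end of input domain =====

-- B replaces A's indexed adjacent-pair scan by a sort-and-compare on the length list (idiomatic; return value only, no side effects).

-- ===== PORT A =====
-- the 'for i in range(len(los)-1)' loop as the obvious structural recursion on the suffix starting at i
def pvLoopA : List String → Bool
  | [] => true
  | [_] => true
  | a :: b :: rest =>
    if PySem.Str.len b ≤ PySem.Str.len a then false
    else pvLoopA (b :: rest)

def growing_strings (los : List String) : Bool :=
  if los.length == 0 || los.length == 1 then true
  else pvLoopA los

-- ===== PORT B =====
def growing_strings_alt (los : List String) : Bool :=
  let lens := los.map (fun s => PySem.Str.len s)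
  decide (lens = PySem.List.sorted lens (fun x => x) false)
    && (PySem.Set.ofList lens).length == lens.length

-- ===== PRECONDITION & SPEC =====
def Spec_growing_strings (los : List String) (out : Bool) : Prop := out = growing_strings_alt los
instance (los : List String) (out : Bool) : Decidable (Spec_growing_strings los out) := by unfold Spec_growing_strings; infer_instance

-- ===== CLAIM (what is proved, stated in full; the proofs are below) =====
def Claim_equal_growing_strings : Prop := ∀ (los : List String), Dom_growing_strings los → Spec_growing_strings los (growing_strings los)

-- ===== LEMMAS AND PROOFS =====

-- A's loop returns true exactly on length-chains that strictly increase step by step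
lemma pvLoopA_iff (xs : List String) :
    pvLoopA xs = true ↔ List.Pairwise (fun a b => PySem.Str.len a < PySem.Str.len b) xs := by
  induction xs with
  | nil => simp [pvLoopA]
  | cons a t ih =>
    cases t with
    | nil => simp [pvLoopA]
    | cons b r =>
      rw [List.pairwise_cons]
      by_cases h : PySem.Str.len b ≤ PySem.Str.len a
      · simp only [pvLoopA, if_pos h, Bool.false_eq_true, false_iff, not_and]
        intro hall
        have := hall b (by simp)
        omega
      · rw [show pvLoopA (a :: b :: r) = pvLoopA (b :: r) from by simp only [pvLoopA, if_neg h]]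
        rw [ih]
        constructor
        · intro hp
          refine ⟨?_, hp⟩
          intro c hc
          rcases List.mem_cons.mp hc with rfl | hc
          · omega
          · have := (List.pairwise_cons.mp hp).1 c hc
            omega
        · exact fun hh => hh.2

-- Set.add facts (Int elements)
lemma set_add_of_mem {s : List Int} {x : Int} (h : x ∈ s) : PySem.Set.add s x = s := by
  simp [PySem.Set.add, PySem.Set.contains, h]

lemma set_add_of_not_mem {s : List Int} {x : Int} (h : x ∉ s) : PySem.Set.add s x = s ++ [x] := by
  simp [PySem.Set.add, PySem.Set.contains, h]

lemma set_add_length_le (s : List Int) (x : Int) : (PySem.Set.add s x).length ≤ s.length + 1 := by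
  by_cases h : x ∈ s
  · simp [set_add_of_mem h]
  · simp [set_add_of_not_mem h]

lemma mem_set_add (s : List Int) (x y : Int) (h : y ∈ s) : y ∈ PySem.Set.add s x := by
  by_cases hx : x ∈ s
  · simpa [set_add_of_mem hx] using h
  · simp [set_add_of_not_mem hx, h]

lemma foldl_add_length_le (xs : List Int) (s : List Int) :
    (xs.foldl PySem.Set.add s).length ≤ s.length + xs.length := by
  induction xs generalizing s with
  | nil => simp
  | cons x t ih =>
    have := ih (PySem.Set.add s x)
    have h1 := set_add_length_le s x
    simp only [List.foldl_cons, List.length_cons]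
    omega

lemma foldl_add_length_lt_of_mem (xs : List Int) (s : List Int) (x : Int)
    (hx : x ∈ s) (hxs : x ∈ xs) :
    (xs.foldl PySem.Set.add s).length < s.length + xs.length := by
  induction xs generalizing s with
  | nil => simp at hxs
  | cons y t ih =>
    simp only [List.foldl_cons, List.length_cons]
    rcases List.mem_cons.mp hxs with rfl | hmem
    · rw [set_add_of_mem hx]
      have := foldl_add_length_le t s
      omega
    · have := ih (PySem.Set.add s y) (mem_set_add s y x hx) hmem
      have h1 := set_add_length_le s y
      omega

lemma foldl_add_length_lt_of_not_nodup (xs : List Int) (s : List Int) (h : ¬ xs.Nodup) :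
    (xs.foldl PySem.Set.add s).length < s.length + xs.length := by
  induction xs generalizing s with
  | nil => simp at h
  | cons x t ih =>
    simp only [List.foldl_cons, List.length_cons]
    by_cases hx : x ∈ t
    · have := foldl_add_length_lt_of_mem t (PySem.Set.add s x)
        x (by by_cases h' : x ∈ s
              · exact mem_set_add s x x h'
              · simp [set_add_of_not_mem h']) hx
      have h1 := set_add_length_le s x
      omega
    · have ht : ¬ t.Nodup := by
        intro hn
        exact h (List.nodup_cons.mpr ⟨hx, hn⟩)
      have := ih (PySem.Set.add s x) ht
      have h1 := set_add_length_le s x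
      omega

lemma foldl_add_of_nodup (xs : List Int) (s : List Int)
    (hn : xs.Nodup) (hd : ∀ x ∈ xs, x ∉ s) :
    xs.foldl PySem.Set.add s = s ++ xs := by
  induction xs generalizing s with
  | nil => simp
  | cons x t ih =>
    have hxs : x ∉ s := hd x (by simp)
    rw [List.foldl_cons, set_add_of_not_mem hxs,
        ih (s ++ [x]) (List.nodup_cons.mp hn).2
          (fun y hy => by
            simp only [List.mem_append, List.mem_singleton]
            rintro (h1 | rfl)
            · exact hd y (by simp [hy]) h1
            · exact (List.nodup_cons.mp hn).1 hy)]
    simp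

lemma ofList_length_eq_iff (xs : List Int) :
    (PySem.Set.ofList xs).length = xs.length ↔ xs.Nodup := by
  constructor
  · intro h
    by_contra hn
    have := foldl_add_length_lt_of_not_nodup xs [] hn
    rw [PySem.Set.ofList_eq_foldl] at h
    simp at this
    omega
  · intro hn
    rw [PySem.Set.ofList_eq_foldl, foldl_add_of_nodup xs [] hn (by simp)]; simp

lemma pairwise_lt_iff (l : List Int) :
    l.Pairwise (· < ·) ↔ l.Pairwise (· ≤ ·) ∧ l.Nodup := by
  constructor
  · intro h
    exact ⟨h.imp (fun hab => le_of_lt hab), h.imp (fun hab => ne_of_lt hab)⟩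
  · rintro ⟨h1, h2⟩
    exact (h1.and h2).imp (fun ⟨hle, hne⟩ => lt_of_le_of_ne hle hne)

lemma A_eq_loop (los : List String) : growing_strings los = pvLoopA los := by
  unfold growing_strings
  match los with
  | [] => simp [pvLoopA]
  | [_] => simp [pvLoopA]
  | a :: b :: r => simp

lemma alt_iff (los : List String) :
    growing_strings_alt los = true ↔
      (los.map (fun s => PySem.Str.len s)).Pairwise (· ≤ ·) ∧
        (los.map (fun s => PySem.Str.len s)).Nodup := by
  unfold growing_strings_alt
  simp only [Bool.and_eq_true, decide_eq_true_eq, beq_iff_eq]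
  rw [ofList_length_eq_iff]
  constructor
  · rintro ⟨h1, h2⟩
    refine ⟨?_, h2⟩
    have := PySem.List.sorted_pairwise (xs := los.map (fun s => PySem.Str.len s))
      (key := fun x => x) 
    rw [← h1] at this
    exact this
  · rintro ⟨h1, h2⟩
    exact ⟨(PySem.List.sorted_eq_self_of_pairwise _ _ h1).symm, h2⟩

-- ===== VERDICT (by name: the statement is the Claim_ definition above) =====
theorem growing_strings_spec : Claim_equal_growing_strings := by
  intro los _
  unfold Spec_growing_strings
  rw [Bool.eq_iff_iff, A_eq_loop, pvLoopA_iff, alt_iff,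
      ← pairwise_lt_iff, List.pairwise_map]
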